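-- pv_equiv track=rewrite | github.com/netzkolchose/elastipy | elastipy/_print.py | dict_rows_to_list_rows
-- ===== SOURCE A (Python) =====
-- from typing import Sequence, Iterable, Mapping, TextIO
--
-- def dict_rows_to_list_rows(dict_rows: Iterable[Mapping], default=None, header: bool = False) -> Iterable[Sequence]:
--     if not isinstance(dict_rows, Sequence):
--         dict_rows = list(dict_rows)
--
--     rows = []
--
--     if not dict_rows:
--         return rows
--
--     # gather all keys but keep order
--     column_keys = list(dict_rows[0].keys())
--     for row in dict_rows:
--         for key in row:
--             if key not in column_keys:
--                 column_keys.append(key)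
--
--     if header:
--         rows.append(column_keys)
--
--     for row in dict_rows:
--         rows.append([row.get(key, default) for key in column_keys])
--
--     return rows
-- ===== SOURCE B (Python) =====
-- def dict_rows_to_list_rows(dict_rows, default=None, header=False):
--     dict_rows = list(dict_rows)
--     if not dict_rows:
--         return []
--
--     # single index dict: key -> column position, in first-seen order
--     index = {}
--     for row in dict_rows:
--         for key in row:
--             index.setdefault(key, len(index))
--
--     body = []
--     for row in dict_rows:
--         out = [default] * len(index)
--         for key, value in row.items():
--             out[index[key]] = value
--         body.append(out)
--
--     return ([list(index)] + body) if header else body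
-- ===== Notes on version B (the rewrite author's own statement) =====
-- stated objective: alternative
-- what changed: A seeds the column list from the first row, then per row tests every key against the column list by linear scan and rebuilds each output row by per-column row.get; B keeps no column list at all, building a single key->position dict with setdefault and scattering each row's items into a default-filled slot list by index, recovering the header as list(index).
import Mathlib
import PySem

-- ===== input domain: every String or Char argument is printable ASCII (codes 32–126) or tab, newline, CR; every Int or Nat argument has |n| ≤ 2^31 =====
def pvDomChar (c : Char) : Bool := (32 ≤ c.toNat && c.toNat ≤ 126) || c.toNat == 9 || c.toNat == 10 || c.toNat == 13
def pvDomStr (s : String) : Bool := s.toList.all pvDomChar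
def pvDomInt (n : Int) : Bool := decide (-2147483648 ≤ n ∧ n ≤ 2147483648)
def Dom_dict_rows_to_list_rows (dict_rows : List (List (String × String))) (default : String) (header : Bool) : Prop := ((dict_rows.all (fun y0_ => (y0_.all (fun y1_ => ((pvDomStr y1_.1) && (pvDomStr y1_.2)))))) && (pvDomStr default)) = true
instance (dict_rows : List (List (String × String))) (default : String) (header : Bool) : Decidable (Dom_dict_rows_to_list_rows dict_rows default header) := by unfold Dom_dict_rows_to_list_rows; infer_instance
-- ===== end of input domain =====

-- B drops A's column list and per-column row.get entirely: it builds one key->position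
-- dict with setdefault and scatters each row's items into a default-filled slot list
-- (objective: alternative decomposition; header recovered as the dict's key list).

-- ===== PORT A =====
def dict_rows_to_list_rows (dict_rows : List (List (String × String))) (default : String) (header : Bool) : List (List String) :=
  match dict_rows with
  | [] => []
  | r0 :: _ =>
    -- gather all keys but keep order
    let column_keys := dict_rows.foldl
      (fun ck row => row.foldl (fun ck kv => if ck.contains kv.1 then ck else ck ++ [kv.1]) ck)
      (r0.map Prod.fst)
    (if header then [column_keys] else []) ++
      dict_rows.map (fun row => column_keys.map (fun key => (PySem.Dict.mk row).getD key default))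

-- ===== PORT B (helpers transcribe Source B's three loops) =====
-- inner loop: index.setdefault(key, len(index)) over one row's items
def pvAddKeys : PySem.Dict String Nat → List (String × String) → PySem.Dict String Nat
  | d, [] => d
  | d, kv :: rest => pvAddKeys (d.setdefault kv.1 d.size) rest

-- outer loop over the rows building the index
def pvBuildIndex : PySem.Dict String Nat → List (List (String × String)) → PySem.Dict String Nat
  | d, [] => d
  | d, row :: rest => pvBuildIndex (pvAddKeys d row) rest

-- out[index[key]] = value over one row's items
def pvScatterRow : List String → PySem.Dict String Nat → List (String × String) → List String
  | out, _, [] => out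
  | out, idx, kv :: rest => pvScatterRow (out.set (idx.getD kv.1 0) kv.2) idx rest

-- the body loop: one default-filled slot list per row, scattered into
def pvBody (idx : PySem.Dict String Nat) (default : String) : List (List (String × String)) → List (List String)
  | [] => []
  | row :: rest => pvScatterRow (List.replicate idx.size default) idx row :: pvBody idx default rest

def dict_rows_to_list_rows_alt (dict_rows : List (List (String × String))) (default : String) (header : Bool) : List (List String) :=
  if dict_rows.isEmpty then []
  else
    let index := pvBuildIndex PySem.Dict.empty dict_rows
    let body := pvBody index default dict_rows
    if header then index.keys :: body else body

-- ===== PRECONDITION & SPEC =====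
-- Pre_ restricts each row's association list to pairwise-distinct keys: exactly the lists that
-- represent Python dicts (a Python dict can never hold a duplicate key, so no Python input is excluded).
def Pre_dict_rows_to_list_rows (dict_rows : List (List (String × String))) (default : String) (header : Bool) : Prop :=
  ∀ row ∈ dict_rows, (row.map Prod.fst).Nodup
instance (dict_rows : List (List (String × String))) (default : String) (header : Bool) : Decidable (Pre_dict_rows_to_list_rows dict_rows default header) := by unfold Pre_dict_rows_to_list_rows; infer_instance
def pvWitness_dict_rows_to_list_rows : (List (List (String × String))) × String × Bool :=
  ([[("a", "1"), ("b", "2")], [("b", "3"), ("c", "4")]], "X", true)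

def Spec_dict_rows_to_list_rows (dict_rows : List (List (String × String))) (default : String) (header : Bool) (out : List (List String)) : Prop := out = dict_rows_to_list_rows_alt dict_rows default header
instance (dict_rows : List (List (String × String))) (default : String) (header : Bool) (out : List (List String)) : Decidable (Spec_dict_rows_to_list_rows dict_rows default header out) := by unfold Spec_dict_rows_to_list_rows; infer_instance

-- ===== CLAIM (what is proved, stated in full; the proofs are below) =====
def Claim_equal_dict_rows_to_list_rows : Prop := ∀ (dict_rows : List (List (String × String))) (default : String) (header : Bool), Dom_dict_rows_to_list_rows dict_rows default header → Pre_dict_rows_to_list_rows dict_rows default header → Spec_dict_rows_to_list_rows dict_rows default header (dict_rows_to_list_rows dict_rows default header)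

-- ===== LEMMAS AND PROOFS =====

-- step and row functions of A's column-gathering fold
def pvStepA (ck : List String) (k : String) : List String :=
  if ck.contains k then ck else ck ++ [k]
def pvRowA (ck : List String) (row : List (String × String)) : List String :=
  row.foldl (fun ck kv => pvStepA ck kv.1) ck

-- index of a key in the column list
def pvPosOf : List String → String → Nat
  | [], _ => 0
  | c :: cs, k => if c = k then 0 else pvPosOf cs k + 1

-- the invariant tying B's index dict to A's gathered column list
def pvInv (d : PySem.Dict String Nat) : Prop :=
  ∀ k, k ∈ d.keys → d.getD k 0 = pvPosOf d.keys k

theorem pvPosOf_append_left (cols : List String) (k : String) (a : String) (h : a ∈ cols) :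
    pvPosOf (cols ++ [k]) a = pvPosOf cols a := by
  induction cols with
  | nil => cases h
  | cons c cs ih =>
    simp only [pvPosOf, List.cons_append]
    rcases List.mem_cons.mp h with h | h
    · simp [h]
    · by_cases hc : c = a <;> simp [hc, ih h]

theorem pvPosOf_append_self (cols : List String) (a : String) (h : a ∉ cols) :
    pvPosOf (cols ++ [a]) a = cols.length := by
  induction cols with
  | nil => simp [pvPosOf]
  | cons c cs ih =>
    have hc : c ≠ a := fun e => h (by simp [e])
    simp only [pvPosOf, List.cons_append, List.length_cons]
    rw [if_neg hc, ih (fun m => h (List.mem_cons_of_mem _ m))]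

theorem pvSize_eq_keys_length (d : PySem.Dict String Nat) : d.size = d.keys.length := by
  simp [PySem.Dict.size, PySem.Dict.keys]

-- one setdefault step keeps the invariant and tracks A's step on the key list
theorem pvStep_joint (d : PySem.Dict String Nat) (k : String) (h : pvInv d) :
    (d.setdefault k d.size).keys = pvStepA d.keys k ∧ pvInv (d.setdefault k d.size) := by
  by_cases hc : d.contains k = true
  · have hm : k ∈ d.keys := (PySem.Dict.contains_iff_mem_keys d k).mp hc
    have e : d.setdefault k d.size = d := PySem.Dict.setdefault_of_contains d d.size hc
    have eA : pvStepA d.keys k = d.keys := by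
      simp only [pvStepA]; rw [if_pos (by simpa using hm)]
    rw [e, eA]; exact ⟨rfl, h⟩
  · have hc' : d.contains k = false := by simpa using hc
    have hm : k ∉ d.keys := fun m => hc ((PySem.Dict.contains_iff_mem_keys d k).mpr m)
    have e : d.setdefault k d.size = d.insert k d.size :=
      PySem.Dict.setdefault_of_not_contains d d.size hc'
    have hk : (d.insert k d.size).keys = d.keys ++ [k] :=
      PySem.Dict.keys_insert_of_not_contains d d.size hc'
    have eA : pvStepA d.keys k = d.keys ++ [k] := by
      simp only [pvStepA]; rw [if_neg (by simpa using hm)]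
    rw [e, hk, eA]
    refine ⟨rfl, ?_⟩
    intro j hj
    rw [hk] at hj
    rw [PySem.Dict.getD_insert, hk]
    by_cases hjk : j = k
    · subst hjk
      rw [if_pos rfl, pvPosOf_append_self d.keys j hm, pvSize_eq_keys_length]
    · have hjm : j ∈ d.keys := by
        rcases List.mem_append.mp hj with h' | h'
        · exact h'
        · exact absurd (by simpa using h') hjk
      rw [if_neg hjk, h j hjm, pvPosOf_append_left d.keys k j hjm]

theorem pvAddKeys_joint (row : List (String × String)) (d : PySem.Dict String Nat) (h : pvInv d) :
    (pvAddKeys d row).keys = pvRowA d.keys row ∧ pvInv (pvAddKeys d row) := by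
  induction row generalizing d with
  | nil => exact ⟨rfl, h⟩
  | cons kv rest ih =>
    obtain ⟨e, hinv⟩ := pvStep_joint d kv.1 h
    have hrec := ih (d.setdefault kv.1 d.size) hinv
    rw [e] at hrec
    simpa only [pvAddKeys, pvRowA, List.foldl_cons] using hrec

theorem pvBuildIndex_joint (rows : List (List (String × String))) (d : PySem.Dict String Nat)
    (h : pvInv d) :
    (pvBuildIndex d rows).keys = rows.foldl pvRowA d.keys ∧ pvInv (pvBuildIndex d rows) := by
  induction rows generalizing d with
  | nil => exact ⟨rfl, h⟩
  | cons r rest ih =>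
    obtain ⟨e, hinv⟩ := pvAddKeys_joint r d h
    have hrec := ih (pvAddKeys d r) hinv
    rw [e] at hrec
    simpa only [pvBuildIndex, List.foldl_cons] using hrec

-- seeding: folding a row whose keys are all fresh appends them in order
theorem pvRowA_fresh (row : List (String × String)) (ck : List String)
    (hnd : (row.map Prod.fst).Nodup) (hfresh : ∀ kv ∈ row, kv.1 ∉ ck) :
    pvRowA ck row = ck ++ row.map Prod.fst := by
  induction row generalizing ck with
  | nil => simp [pvRowA]
  | cons kv rest ih =>
    rw [List.map_cons] at hnd
    have hfirst : kv.1 ∉ rest.map Prod.fst := (List.nodup_cons.mp hnd).1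
    have hnd' : (rest.map Prod.fst).Nodup := (List.nodup_cons.mp hnd).2
    have hnotin : kv.1 ∉ ck := hfresh kv (by simp)
    have hstep : pvStepA ck kv.1 = ck ++ [kv.1] := by
      simp only [pvStepA]; rw [if_neg (by simpa using hnotin)]
    have hfresh' : ∀ p ∈ rest, p.1 ∉ ck ++ [kv.1] := by
      intro p hp
      simp only [List.mem_append, List.mem_singleton]
      rintro (h | h)
      · exact hfresh p (List.mem_cons_of_mem _ hp) h
      · exact hfirst (h ▸ List.mem_map_of_mem hp)
    calc pvRowA ck (kv :: rest) = pvRowA (ck ++ [kv.1]) rest := by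
          simp only [pvRowA, List.foldl_cons, hstep]
      _ = ck ++ [kv.1] ++ rest.map Prod.fst := ih (ck ++ [kv.1]) hnd' hfresh'
      _ = ck ++ (kv :: rest).map Prod.fst := by simp

-- folding a row all of whose keys are already present does nothing
theorem pvRowA_stale (row : List (String × String)) (ck : List String)
    (h : ∀ kv ∈ row, kv.1 ∈ ck) : pvRowA ck row = ck := by
  induction row with
  | nil => rfl
  | cons kv rest ih =>
    have hstep : pvStepA ck kv.1 = ck := by
      simp only [pvStepA]; rw [if_pos (by simpa using h kv (by simp))]
    simp only [pvRowA, List.foldl_cons] at ih ⊢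
    rw [hstep]
    exact ih (fun p hp => h p (List.mem_cons_of_mem _ hp))

-- monotonicity / completeness of the column gathering
theorem pvStepA_mono (ck : List String) (k a : String) (h : a ∈ ck) : a ∈ pvStepA ck k := by
  simp only [pvStepA]; split <;> simp [h]

theorem pvRowA_mono (row : List (String × String)) (ck : List String) (a : String) (h : a ∈ ck) :
    a ∈ pvRowA ck row := by
  induction row generalizing ck with
  | nil => exact h
  | cons kv rest ih => exact ih _ (pvStepA_mono ck kv.1 a h)

theorem pvFoldA_mono (rows : List (List (String × String))) (ck : List String) (a : String)
    (h : a ∈ ck) : a ∈ rows.foldl pvRowA ck := by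
  induction rows generalizing ck with
  | nil => exact h
  | cons r rest ih => exact ih _ (pvRowA_mono r ck a h)

theorem pvRowA_complete (row : List (String × String)) (ck : List String) (kv : String × String)
    (h : kv ∈ row) : kv.1 ∈ pvRowA ck row := by
  induction row generalizing ck with
  | nil => cases h
  | cons p rest ih =>
    rcases List.mem_cons.mp h with h | h
    · subst h
      exact pvRowA_mono rest _ kv.1 (by simp only [pvStepA]; split <;> simp_all)
    · exact ih _ h

theorem pvFoldA_complete (rows : List (List (String × String))) (ck : List String)
    (row : List (String × String)) (hr : row ∈ rows) (kv : String × String) (h : kv ∈ row) :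
    kv.1 ∈ rows.foldl pvRowA ck := by
  obtain ⟨l1, l2, rfl⟩ := List.append_of_mem hr
  rw [List.foldl_append, List.foldl_cons]
  exact pvFoldA_mono l2 _ kv.1 (pvRowA_complete row _ kv h)

-- nodup is preserved
theorem pvStepA_nodup (ck : List String) (k : String) (h : ck.Nodup) : (pvStepA ck k).Nodup := by
  simp only [pvStepA]; split
  · exact h
  · next hc =>
    rw [List.nodup_append]
    refine ⟨h, List.nodup_singleton _, ?_⟩
    intro a ha b hb
    rw [List.mem_singleton] at hb
    subst hb
    have hkm : b ∉ ck := by simpa using hc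
    exact fun e => hkm (e ▸ ha)

theorem pvRowA_nodup (row : List (String × String)) (ck : List String) (h : ck.Nodup) :
    (pvRowA ck row).Nodup := by
  induction row generalizing ck with
  | nil => exact h
  | cons kv rest ih => exact ih _ (pvStepA_nodup ck kv.1 h)

theorem pvFoldA_nodup (rows : List (List (String × String))) (ck : List String) (h : ck.Nodup) :
    (rows.foldl pvRowA ck).Nodup := by
  induction rows generalizing ck with
  | nil => exact h
  | cons r rest ih => exact ih _ (pvRowA_nodup r ck h)

-- setting the slot of a column in a mapped list
theorem pvMap_set_posOf (cols : List String) (f : String → String) (a : String) (v : String)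
    (hnd : cols.Nodup) (hm : a ∈ cols) :
    (cols.map f).set (pvPosOf cols a) v = cols.map (fun k => if k = a then v else f k) := by
  induction cols with
  | nil => cases hm
  | cons c cs ih =>
    by_cases hc : c = a
    · subst hc
      have hcongr : ∀ k ∈ cs, (if k = c then v else f k) = f k := by
        intro k hk
        rw [if_neg]; rintro rfl; exact (List.nodup_cons.mp hnd).1 hk
      have h0 : pvPosOf (c :: cs) c = 0 := by simp [pvPosOf]
      rw [h0, List.map_cons, List.map_cons, List.set_cons_zero, if_pos rfl,
        List.map_congr_left hcongr]
    · have hm' : a ∈ cs := by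
        rcases List.mem_cons.mp hm with h | h
        · exact absurd h.symm hc
        · exact h
      have hpos : pvPosOf (c :: cs) a = pvPosOf cs a + 1 := by simp [pvPosOf, hc]
      rw [hpos, List.map_cons, List.map_cons, List.set_cons_succ, if_neg hc,
        ih (List.nodup_cons.mp hnd).2 hm']

-- B's scatter loop, with indices rewritten to pvPosOf, equals A's gather comprehension
theorem pvScatter_gather (row : List (String × String)) (cols : List String) (f : String → String)
    (hnd : cols.Nodup) (hrnd : (row.map Prod.fst).Nodup) (hmem : ∀ kv ∈ row, kv.1 ∈ cols) :
    row.foldl (fun out kv => out.set (pvPosOf cols kv.1) kv.2) (cols.map f)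
      = cols.map (fun key => (PySem.Dict.mk row).getD key (f key)) := by
  induction row generalizing f with
  | nil =>
    apply List.map_congr_left
    intro k _
    simp [PySem.Dict.getD, PySem.Dict.get?]
  | cons kv rest ih =>
    rw [List.map_cons] at hrnd
    have hfirst : kv.1 ∉ rest.map Prod.fst := (List.nodup_cons.mp hrnd).1
    have hrnd' : (rest.map Prod.fst).Nodup := (List.nodup_cons.mp hrnd).2
    have hmem' : ∀ p ∈ rest, p.1 ∈ cols := fun p hp => hmem p (List.mem_cons_of_mem _ hp)
    rw [List.foldl_cons, pvMap_set_posOf cols f kv.1 kv.2 hnd (hmem kv (by simp)),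
      ih (fun k => if k = kv.1 then kv.2 else f k) hrnd' hmem']
    apply List.map_congr_left
    intro k _
    rw [PySem.Dict.getD_eq_get?_getD, PySem.Dict.getD_eq_get?_getD, PySem.Dict.get?_mk_cons]
    by_cases hk : kv.1 = k
    · subst hk
      have hnone : (PySem.Dict.mk rest).get? kv.1 = none := by
        rw [PySem.Dict.get?_eq_none_iff_not_mem_keys]
        simpa [PySem.Dict.keys] using hfirst
      simp [hnone]
    · have hbeq : ¬ ((kv.1 == k) = true) := by simp [hk]
      rw [if_neg hbeq, if_neg (show ¬ k = kv.1 from fun h => hk h.symm)]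

-- pvScatterRow is the foldl it transcribes
theorem pvScatterRow_eq_foldl (row : List (String × String)) (idx : PySem.Dict String Nat)
    (out : List String) :
    pvScatterRow out idx row = row.foldl (fun out kv => out.set (idx.getD kv.1 0) kv.2) out := by
  induction row generalizing out with
  | nil => rfl
  | cons kv rest ih => simp only [pvScatterRow, List.foldl_cons, ih]

-- rewriting B's scatter index through the invariant
theorem pvScatter_congr (row : List (String × String)) (cols : List String)
    (idx : PySem.Dict String Nat) (init : List String)
    (h : ∀ kv ∈ row, idx.getD kv.1 0 = pvPosOf cols kv.1) :
    row.foldl (fun out kv => out.set (idx.getD kv.1 0) kv.2) init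
      = row.foldl (fun out kv => out.set (pvPosOf cols kv.1) kv.2) init := by
  induction row generalizing init with
  | nil => rfl
  | cons kv rest ih =>
    rw [List.foldl_cons, List.foldl_cons, h kv (by simp)]
    exact ih _ (fun p hp => h p (List.mem_cons_of_mem _ hp))

-- pvBody is the map over rows it transcribes
theorem pvBody_eq_map (idx : PySem.Dict String Nat) (default : String)
    (rows : List (List (String × String))) :
    pvBody idx default rows
      = rows.map (fun row => pvScatterRow (List.replicate idx.size default) idx row) := by
  induction rows with
  | nil => rfl
  | cons r rest ih => simp only [pvBody, List.map_cons, ih]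

-- ===== VERDICT (by name: the statement is the Claim_ definition above) =====
theorem dict_rows_to_list_rows_spec : Claim_equal_dict_rows_to_list_rows := by
  intro dict_rows default header _ hpre
  unfold Spec_dict_rows_to_list_rows dict_rows_to_list_rows dict_rows_to_list_rows_alt
  match dict_rows with
  | [] => rfl
  | r0 :: rest =>
    simp only [List.isEmpty_cons, if_neg (by decide : ¬ (false = true))]
    have hr0nd : (r0.map Prod.fst).Nodup := hpre r0 (by simp)
    have hinv0 : pvInv PySem.Dict.empty := by
      intro k hk
      simp [PySem.Dict.keys, PySem.Dict.empty] at hk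
    obtain ⟨hj1, hj2⟩ := pvBuildIndex_joint (r0 :: rest) PySem.Dict.empty hinv0
    have hkeys0 : (PySem.Dict.empty : PySem.Dict String Nat).keys = [] := by
      simp [PySem.Dict.keys, PySem.Dict.empty]
    rw [hkeys0] at hj1
    have hseed : (r0 :: rest).foldl pvRowA [] = (r0 :: rest).foldl pvRowA (r0.map Prod.fst) := by
      have h1 : pvRowA [] r0 = r0.map Prod.fst := by
        simpa using pvRowA_fresh r0 [] hr0nd (by simp)
      have h2 : pvRowA (r0.map Prod.fst) r0 = r0.map Prod.fst :=
        pvRowA_stale r0 _ (fun kv hk => List.mem_map_of_mem hk)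
      rw [List.foldl_cons, List.foldl_cons, h1, h2]
    set cols := (r0 :: rest).foldl pvRowA (r0.map Prod.fst) with hcols
    have hBA : (pvBuildIndex PySem.Dict.empty (r0 :: rest)).keys = cols := hj1.trans hseed
    have hndA : cols.Nodup := by
      rw [← hseed]
      exact pvFoldA_nodup _ [] List.nodup_nil
    -- A's fold lambda is the named helper
    have eA : (r0 :: rest).foldl
        (fun ck row => row.foldl (fun ck kv => if ck.contains kv.1 then ck else ck ++ [kv.1]) ck)
        (r0.map Prod.fst) = cols := rfl
    have hsize : (pvBuildIndex PySem.Dict.empty (r0 :: rest)).size = cols.length := by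
      rw [pvSize_eq_keys_length, hBA]
    have hbody : (r0 :: rest).map (fun row => cols.map (fun key => (PySem.Dict.mk row).getD key default))
        = (r0 :: rest).map (fun row =>
            pvScatterRow (List.replicate (pvBuildIndex PySem.Dict.empty (r0 :: rest)).size default)
              (pvBuildIndex PySem.Dict.empty (r0 :: rest)) row) := by
      apply List.map_congr_left
      intro row hrow
      have hmem : ∀ kv ∈ row, kv.1 ∈ cols := by
        intro kv hk
        rw [← hseed]
        exact pvFoldA_complete (r0 :: rest) [] row hrow kv hk
      have hidx : ∀ kv ∈ row,
          (pvBuildIndex PySem.Dict.empty (r0 :: rest)).getD kv.1 0 = pvPosOf cols kv.1 := by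
        intro kv hk
        rw [hj2 kv.1 (by rw [hBA]; exact hmem kv hk), hBA]
      have hrepl : cols.map (fun (_ : String) => default) = List.replicate cols.length default := by
        simp
      rw [pvScatterRow_eq_foldl, hsize, pvScatter_congr row cols _ _ hidx, ← hrepl,
        pvScatter_gather row cols (fun _ => default) hndA (hpre row hrow) hmem]
    rw [eA, hBA, pvBody_eq_map, ← hbody]
    cases header <;> simp
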